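-- pv_equiv track=rewrite | github.com/Brown-University-Library/warc_tracker_script | lib/orchestration.py | get_download_progress_milestone_update
-- ===== SOURCE A (Python) =====
-- DOWNLOAD_PROGRESS_MILESTONES = (20, 40, 60, 80)
--
-- def build_download_progress_detail(percent_complete: int, completed_count: int, total_count: int) -> str:
--     """
--     Builds compact progress-detail text for one download milestone.
--     Called by: get_download_progress_milestone_update()
--     """
--     result = f'{percent_complete}% ({completed_count}/{total_count} files)'
--     return result
--
-- def get_download_progress_milestone_update(
--     total_count: int,
--     completed_count: int,
--     last_reported_percent: int,
-- ) -> tuple[int, str | None]: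
--     """
--     Returns the next coarse progress milestone text, if a new milestone has been reached.
--     Called by: run_planned_downloads()
--     """
--     next_reported_percent = last_reported_percent
--     progress_detail: str | None = None
--     if total_count > 0 and completed_count < total_count:
--         percent_complete = (completed_count * 100) // total_count
--         for milestone_percent in DOWNLOAD_PROGRESS_MILESTONES:
--             if percent_complete >= milestone_percent and milestone_percent > last_reported_percent:
--                 next_reported_percent = milestone_percent
--                 progress_detail = build_download_progress_detail(
--                     milestone_percent,
--                     completed_count,
--                     total_count,
--                 )
--     result = (next_reported_percent, progress_detail)
--     return result
-- ===== SOURCE B (Python) =====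
-- DOWNLOAD_PROGRESS_MILESTONES = (20, 40, 60, 80)
--
-- def build_download_progress_detail(percent_complete: int, completed_count: int, total_count: int) -> str:
--     result = f'{percent_complete}% ({completed_count}/{total_count} files)'
--     return result
--
-- def get_download_progress_milestone_update(total_count, completed_count, last_reported_percent):
--     if total_count > 0 and completed_count < total_count:
--         percent_complete = (completed_count * 100) // total_count
--         candidate = min(80, (percent_complete // 20) * 20)
--         if candidate >= 20 and candidate > last_reported_percent:
--             return (candidate, build_download_progress_detail(candidate, completed_count, total_count))
--     return (last_reported_percent, None)
-- ===== Notes on version B (the rewrite author's own statement) =====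
-- stated objective: simpler
-- what changed: Replaced the loop over the milestone tuple (last qualifying milestone wins) with a closed-form arithmetic computation: candidate = min(80, (percent_complete // 20) * 20), guarded by candidate >= 20 and candidate > last_reported_percent.
import Mathlib
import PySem

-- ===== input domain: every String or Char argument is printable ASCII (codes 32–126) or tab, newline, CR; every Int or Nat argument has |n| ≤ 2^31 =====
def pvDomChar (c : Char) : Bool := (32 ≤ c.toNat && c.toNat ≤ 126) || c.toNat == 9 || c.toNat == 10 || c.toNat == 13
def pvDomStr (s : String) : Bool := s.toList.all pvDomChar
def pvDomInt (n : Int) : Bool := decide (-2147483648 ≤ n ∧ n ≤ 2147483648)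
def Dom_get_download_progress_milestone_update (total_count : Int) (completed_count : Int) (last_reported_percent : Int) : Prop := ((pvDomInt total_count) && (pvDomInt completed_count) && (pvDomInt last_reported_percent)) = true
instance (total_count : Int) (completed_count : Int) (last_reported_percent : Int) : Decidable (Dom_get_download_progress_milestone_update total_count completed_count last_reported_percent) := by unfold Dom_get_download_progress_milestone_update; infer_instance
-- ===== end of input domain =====

-- B replaces A's loop over the milestone tuple with a closed-form arithmetic candidate; objective: simpler.

-- ===== PORT A =====
-- shared helper (both Pythons call the same build_download_progress_detail)
def build_download_progress_detail (percent_complete : Int) (completed_count : Int) (total_count : Int) : String :=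
  PySem.Int.toStr percent_complete ++ "% (" ++ PySem.Int.toStr completed_count ++ "/" ++ PySem.Int.toStr total_count ++ " files)"

def DOWNLOAD_PROGRESS_MILESTONES : List Int := [20, 40, 60, 80]

def get_download_progress_milestone_update (total_count : Int) (completed_count : Int) (last_reported_percent : Int) : Int × Option String :=
  let next_reported_percent : Int := last_reported_percent
  let progress_detail : Option String := none
  if total_count > 0 ∧ completed_count < total_count then
    let percent_complete := PySem.Int.floordiv (completed_count * 100) total_count
    DOWNLOAD_PROGRESS_MILESTONES.foldl
      (fun (st : Int × Option String) milestone_percent =>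
        if percent_complete ≥ milestone_percent ∧ milestone_percent > last_reported_percent then
          (milestone_percent, some (build_download_progress_detail milestone_percent completed_count total_count))
        else st)
      (next_reported_percent, progress_detail)
  else
    (next_reported_percent, progress_detail)

-- ===== PORT B =====
def get_download_progress_milestone_update_alt (total_count : Int) (completed_count : Int) (last_reported_percent : Int) : Int × Option String :=
  if total_count > 0 ∧ completed_count < total_count then
    let percent_complete := PySem.Int.floordiv (completed_count * 100) total_count
    let candidate := min 80 (PySem.Int.floordiv percent_complete 20 * 20)
    if candidate ≥ 20 ∧ candidate > last_reported_percent then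
      (candidate, some (build_download_progress_detail candidate completed_count total_count))
    else
      (last_reported_percent, none)
  else
    (last_reported_percent, none)

-- ===== PRECONDITION & SPEC =====
def Spec_get_download_progress_milestone_update (total_count : Int) (completed_count : Int) (last_reported_percent : Int) (out : Int × Option String) : Prop := out = get_download_progress_milestone_update_alt total_count completed_count last_reported_percent
instance (total_count : Int) (completed_count : Int) (last_reported_percent : Int) (out : Int × Option String) : Decidable (Spec_get_download_progress_milestone_update total_count completed_count last_reported_percent out) := by unfold Spec_get_download_progress_milestone_update; infer_instance

-- ===== CLAIM (what is proved, stated in full; the proofs are below) =====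
def Claim_equal_get_download_progress_milestone_update : Prop := ∀ (total_count : Int) (completed_count : Int) (last_reported_percent : Int), Dom_get_download_progress_milestone_update total_count completed_count last_reported_percent → Spec_get_download_progress_milestone_update total_count completed_count last_reported_percent (get_download_progress_milestone_update total_count completed_count last_reported_percent)

-- ===== LEMMAS AND PROOFS =====

-- core fact: for any percent p and last l, the unrolled milestone loop equals the arithmetic form
theorem milestone_core (p l c t : Int) :
    ([ (20:Int), 40, 60, 80].foldl
      (fun (st : Int × Option String) m =>
        if p ≥ m ∧ m > l then (m, some (build_download_progress_detail m c t)) else st)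
      (l, none))
    = (if (min 80 (PySem.Int.floordiv p 20 * 20)) ≥ 20 ∧ (min 80 (PySem.Int.floordiv p 20 * 20)) > l then
        ((min 80 (PySem.Int.floordiv p 20 * 20)), some (build_download_progress_detail (min 80 (PySem.Int.floordiv p 20 * 20)) c t))
      else (l, none)) := by
  have h20 : PySem.Int.floordiv p 20 = p / 20 := PySem.Int.floordiv_eq_ediv_of_pos (by omega)
  rw [h20]
  have hlo : p / 20 * 20 ≤ p := Int.ediv_mul_le p (by omega)
  have hhi : p < p / 20 * 20 + 20 := by
    have := Int.lt_ediv_add_one_mul_self p (b := 20) (by omega)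
    omega
  simp only [List.foldl]
  rcases lt_or_ge p 40 with h1 | _
  · rcases lt_or_ge p 20 with h0 | _
    · have : min (80:Int) (p / 20 * 20) < 20 := by omega
      split_ifs <;> first | rfl | omega
    · have hc : min (80:Int) (p / 20 * 20) = 20 := by omega
      rw [hc]; split_ifs <;> first | rfl | omega
  · rcases lt_or_ge p 60 with h2 | _
    · have hc : min (80:Int) (p / 20 * 20) = 40 := by omega
      rw [hc]; split_ifs <;> first | rfl | omega
    · rcases lt_or_ge p 80 with h3 | _
      · have hc : min (80:Int) (p / 20 * 20) = 60 := by omega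
        rw [hc]; split_ifs <;> first | rfl | omega
      · have hc : min (80:Int) (p / 20 * 20) = 80 := by omega
        rw [hc]; split_ifs <;> first | rfl | omega

-- ===== VERDICT (by name: the statement is the Claim_ definition above) =====
theorem get_download_progress_milestone_update_spec : Claim_equal_get_download_progress_milestone_update := by
  intro t c l _
  unfold Spec_get_download_progress_milestone_update
  unfold get_download_progress_milestone_update get_download_progress_milestone_update_alt DOWNLOAD_PROGRESS_MILESTONES
  by_cases h : t > 0 ∧ c < t
  · simp only [h]
    exact milestone_core (PySem.Int.floordiv (c * 100) t) l c t
  · simp only [h, if_false]
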